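-- pv_equiv track=rewrite | github.com/holi-lab/ValuePortrait | lm_evaluation/src/core/response_parser.py | parse_likert_response
-- ===== SOURCE A (Python) =====
-- def normalize_response(text: str) -> str:
--     """Normalize the response text by removing extra spaces and converting to lowercase"""
--     return ' '.join(text.lower().split())
--
-- def parse_likert_response(raw_response: str) -> str:
--     """Parse the raw response to extract the standardized Likert scale response"""
--     response_mapping = {
--         "very much like me": [
--             "very much like me",
--             "likes me very much",
--             "like me very much"
--         ],
--         "like me": [
--             "like me",
--             "likes me"
--         ],
--         "somewhat like me": [
--             "somewhat like me",
--             "somewhat likes me",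
--             "some what like me",
--             "some what likes me",
--         ],
--         "a little like me": [
--             "a little like me",
--             "little like me",
--         ],
--         "not like me": [
--             "not like me",
--             "does not like me",
--             "doesn't like me",
--             "is not like me"
--         ],
--         "not like me at all": [
--             "not like me at all",
--             "not at all like me",
--             "does not like me at all",
--             "isn't like me at all"
--         ]
--     }
--
--     normalized_response = normalize_response(raw_response)
--
--     # First, try exact matches
--     for standard_form, variations in response_mapping.items():
--         for variant in variations:
--             if normalize_response(variant) == normalized_response:
--                 return standard_form
--
--     # If no exact match, try "contains matching" and collect all matches
--     possible_matches = []
--     for standard_form, variations in response_mapping.items():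
--         for variant in variations:
--             n_variant = normalize_response(variant)
--             if n_variant in normalized_response:
--                 possible_matches.append((standard_form, n_variant))
--
--     # If we have multiple possible matches, choose the one with the longest matching variant
--     if possible_matches:
--         possible_matches.sort(key=lambda x: len(x[1]), reverse=True)
--         return possible_matches[0][0]
--
--     raise ValueError(f"Could not parse valid Likert response from: {raw_response}")
-- ===== SOURCE B (Python) =====
-- def normalize_response(text: str) -> str:
--     """Normalize the response text by removing extra spaces and converting to lowercase"""
--     return ' '.join(text.lower().split())
--
-- def parse_likert_response(raw_response: str) -> str:
--     """Parse the raw response: single pass keeping the longest contained variant (first wins on ties)"""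
--     pairs = [
--         ("very much like me", "very much like me"),
--         ("very much like me", "likes me very much"),
--         ("very much like me", "like me very much"),
--         ("like me", "like me"),
--         ("like me", "likes me"),
--         ("somewhat like me", "somewhat like me"),
--         ("somewhat like me", "somewhat likes me"),
--         ("somewhat like me", "some what like me"),
--         ("somewhat like me", "some what likes me"),
--         ("a little like me", "a little like me"),
--         ("a little like me", "little like me"),
--         ("not like me", "not like me"),
--         ("not like me", "does not like me"),
--         ("not like me", "doesn't like me"),
--         ("not like me", "is not like me"),
--         ("not like me at all", "not like me at all"),
--         ("not like me at all", "not at all like me"),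
--         ("not like me at all", "does not like me at all"),
--         ("not like me at all", "isn't like me at all"),
--     ]
--     normalized_response = normalize_response(raw_response)
--     best = None
--     for standard_form, variant in pairs:
--         n_variant = normalize_response(variant)
--         if n_variant in normalized_response and (best is None or len(best[1]) < len(n_variant)):
--             best = (standard_form, n_variant)
--     if best is None:
--         raise ValueError(f"Could not parse valid Likert response from: {raw_response}")
--     return best[0]
-- ===== Notes on version B (the rewrite author's own statement) =====
-- stated objective: simpler
-- what changed: B replaces A's two nested passes over the mapping (an exact-match scan, then a substring-collect pass followed by a stable descending sort) with a single pass over a flat (standard_form, variant) list that keeps the longest contained variant, the first one winning ties; exact matches coincide with full-length substring matches, so one pass suffices and the sort disappears.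
import Mathlib
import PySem

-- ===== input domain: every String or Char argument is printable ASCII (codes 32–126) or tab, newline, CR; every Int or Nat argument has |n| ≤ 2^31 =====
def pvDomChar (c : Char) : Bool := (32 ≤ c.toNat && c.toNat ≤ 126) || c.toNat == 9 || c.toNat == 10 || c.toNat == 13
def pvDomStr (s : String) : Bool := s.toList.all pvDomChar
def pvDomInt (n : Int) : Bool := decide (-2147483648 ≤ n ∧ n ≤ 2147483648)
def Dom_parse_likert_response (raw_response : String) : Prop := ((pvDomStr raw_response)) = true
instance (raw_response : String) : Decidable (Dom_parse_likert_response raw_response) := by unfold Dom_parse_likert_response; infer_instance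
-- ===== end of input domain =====

-- B replaces A's two nested passes (exact-match scan, then substring-collect + sort) by ONE pass over a
-- flat (standard_form, variant) list keeping the longest contained variant, first one winning ties (simpler).

-- ===== PORT A =====

-- normalize_response: ' '.join(text.lower().split())
def pvNorm (s : String) : String :=
  PySem.Str.join " " (PySem.Str.split₀ (PySem.Str.lower s))

-- response_mapping, in Python's dict insertion order
def pvMapping : List (String × List String) :=
  [ ("very much like me", ["very much like me", "likes me very much", "like me very much"]),
    ("like me", ["like me", "likes me"]),
    ("somewhat like me", ["somewhat like me", "somewhat likes me", "some what like me", "some what likes me"]),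
    ("a little like me", ["a little like me", "little like me"]),
    ("not like me", ["not like me", "does not like me", "doesn't like me", "is not like me"]),
    ("not like me at all", ["not like me at all", "not at all like me", "does not like me at all", "isn't like me at all"]) ]

-- first exact-match loop, inner loop over variations
def pvExactInner (nr std : String) : List String → Option String
  | [] => none
  | v :: vs => if pvNorm v == nr then some std else pvExactInner nr std vs

-- first exact-match loop, outer loop over the mapping
def pvExact (nr : String) : List (String × List String) → Option String
  | [] => none
  | e :: rest =>
    match pvExactInner nr e.1 e.2 with
    | some r => some r
    | none => pvExact nr rest

-- possible_matches collection loop (nested for, appending (standard_form, n_variant))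
def pvCollect (nr : String) (m : List (String × List String)) : List (String × String) :=
  m.foldl (fun acc e =>
    e.2.foldl (fun acc v =>
      let nv := pvNorm v
      if PySem.Str.isIn nv nr then acc ++ [(e.1, nv)] else acc) acc) []

def parse_likert_response (raw_response : String) : String :=
  let nr := pvNorm raw_response
  match pvExact nr pvMapping with
  | some std => std
  | none =>
    match PySem.List.sorted (pvCollect nr pvMapping) (fun p => PySem.Str.len p.2) true with
    | m :: _ => m.1
    | [] => ""   -- Python raises ValueError here; excluded by Pre_

-- ===== PORT B =====

-- the flat (standard_form, variant) pairs list of Source B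
def pvPairs : List (String × String) :=
  [ ("very much like me", "very much like me"),
    ("very much like me", "likes me very much"),
    ("very much like me", "like me very much"),
    ("like me", "like me"),
    ("like me", "likes me"),
    ("somewhat like me", "somewhat like me"),
    ("somewhat like me", "somewhat likes me"),
    ("somewhat like me", "some what like me"),
    ("somewhat like me", "some what likes me"),
    ("a little like me", "a little like me"),
    ("a little like me", "little like me"),
    ("not like me", "not like me"),
    ("not like me", "does not like me"),
    ("not like me", "doesn't like me"),
    ("not like me", "is not like me"),
    ("not like me at all", "not like me at all"),
    ("not like me at all", "not at all like me"),
    ("not like me at all", "does not like me at all"),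
    ("not like me at all", "isn't like me at all") ]

-- Source B's single loop: keep the longest contained variant, first one wins ties
def pvBestLoop (nr : String) : List (String × String) → Option (String × String) → Option (String × String)
  | [], best => best
  | e :: rest, best =>
    let nv := pvNorm e.2
    pvBestLoop nr rest
      (if PySem.Str.isIn nv nr &&
          (match best with
           | none => true
           | some b => decide (PySem.Str.len b.2 < PySem.Str.len nv)) then
        some (e.1, nv)
      else best)

def parse_likert_response_alt (raw_response : String) : String :=
  let nr := pvNorm raw_response
  match pvBestLoop nr pvPairs none with
  | some b => b.1
  | none => ""   -- Python raises ValueError here; excluded by Pre_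

-- ===== PRECONDITION & SPEC =====
-- A raises ValueError exactly when no variant phrase occurs in the normalized response; Pre_ excludes those inputs.
def Pre_parse_likert_response (raw_response : String) : Prop :=
  ∃ p ∈ pvPairs, PySem.Str.isIn p.2 (pvNorm raw_response) = true
instance (raw_response : String) : Decidable (Pre_parse_likert_response raw_response) := by
  unfold Pre_parse_likert_response; infer_instance

def pvWitness_parse_likert_response : String := "It is very much LIKE  me!"

def Spec_parse_likert_response (raw_response : String) (out : String) : Prop := out = parse_likert_response_alt raw_response
instance (raw_response : String) (out : String) : Decidable (Spec_parse_likert_response raw_response out) := by unfold Spec_parse_likert_response; infer_instance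

-- ===== CLAIM (what is proved, stated in full; the proofs are below) =====
def Claim_equal_parse_likert_response : Prop := ∀ (raw_response : String), Dom_parse_likert_response raw_response → Pre_parse_likert_response raw_response → Spec_parse_likert_response raw_response (parse_likert_response raw_response)

-- ===== LEMMAS AND PROOFS =====

-- the running-max step of Source B's loop ("replace only on strictly longer")
def pvPick (b x : String × String) : String × String :=
  if PySem.Str.len b.2 < PySem.Str.len x.2 then x else b

-- the two flattenings of the mapping both give pvPairs (all variants are already normalized)
lemma pvFlat_eq : pvMapping.flatMap (fun e => e.2.map (fun v => (e.1, v))) = pvPairs := by decide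

lemma pvFlatNorm_eq : pvMapping.flatMap (fun e => e.2.map (fun v => (e.1, pvNorm v))) = pvPairs := by decide

lemma pvNorm_pairs : ∀ p ∈ pvPairs, pvNorm p.2 = p.2 := by decide

lemma exactInner_eq (nr std : String) (vs : List String) :
    pvExactInner nr std vs =
      ((vs.map (fun v => (std, v))).find? (fun p => pvNorm p.2 == nr)).map Prod.fst := by
  induction vs with
  | nil => simp [pvExactInner]
  | cons v vs ih =>
    simp only [pvExactInner, List.map_cons, List.find?_cons]
    by_cases h : pvNorm v == nr
    · simp [h]
    · simp only [h]
      simpa using ih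

lemma pvExact_eq (nr : String) (m : List (String × List String)) :
    pvExact nr m =
      ((m.flatMap (fun e => e.2.map (fun v => (e.1, v)))).find? (fun p => pvNorm p.2 == nr)).map Prod.fst := by
  induction m with
  | nil => simp [pvExact]
  | cons e rest ih =>
    simp only [pvExact, List.flatMap_cons, List.find?_append, exactInner_eq nr e.1 e.2]
    cases h : (e.2.map (fun v => (e.1, v))).find? (fun p => pvNorm p.2 == nr) with
    | some r => simp
    | none => simp [ih]
lemma collectInner_eq (nr std : String) (vs : List String) (acc : List (String × String)) :
    vs.foldl (fun acc v =>
      let nv := pvNorm v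
      if PySem.Str.isIn nv nr then acc ++ [(std, nv)] else acc) acc
    = acc ++ ((vs.map (fun v => (std, pvNorm v))).filter (fun p => PySem.Str.isIn p.2 nr)) := by
  induction vs generalizing acc with
  | nil => simp
  | cons v vs ih =>
    simp only [List.foldl_cons, List.map_cons, List.filter_cons]
    by_cases h : PySem.Str.isIn (pvNorm v) nr = true
    · rw [ih]
      simp only [h, if_true]
      simp
    · rw [ih]
      simp only [h]
      simp
lemma bestLoop_some (nr : String) (L : List (String × String))
    (hn : ∀ p ∈ L, pvNorm p.2 = p.2) (b : String × String) :
    pvBestLoop nr L (some b) =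
      some ((L.filter (fun p => PySem.Str.isIn p.2 nr)).foldl pvPick b) := by
  induction L generalizing b with
  | nil => simp [pvBestLoop]
  | cons e rest ih =>
    have hne := hn e (by simp)
    have hrest : ∀ p ∈ rest, pvNorm p.2 = p.2 := fun p hp => hn p (by simp [hp])
    simp only [pvBestLoop, hne, List.filter_cons]
    split_ifs with ha hb hc
    · simp only [Bool.and_eq_true, decide_eq_true_eq, PySem.Str.len_eq, Nat.cast_lt, String.length_toList] at ha
      rw [ih hrest]
      simp [List.foldl_cons, pvPick, ha.2]
    · simp only [Bool.and_eq_true] at ha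
      exact absurd ha.1 hb
    · rw [ih hrest]
      simp only [Bool.and_eq_true, decide_eq_true_eq, not_and, PySem.Str.len_eq, Nat.cast_lt, String.length_toList] at ha
      simp [List.foldl_cons, pvPick, ha hc]
    · exact ih hrest b

lemma bestLoop_none (nr : String) (L : List (String × String))
    (hn : ∀ p ∈ L, pvNorm p.2 = p.2) :
    pvBestLoop nr L none =
      match L.filter (fun p => PySem.Str.isIn p.2 nr) with
      | [] => none
      | m :: t => some (t.foldl pvPick m) := by
  induction L with
  | nil => simp [pvBestLoop]
  | cons e rest ih =>
    have hne := hn e (by simp)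
    have hrest : ∀ p ∈ rest, pvNorm p.2 = p.2 := fun p hp => hn p (by simp [hp])
    simp only [pvBestLoop, hne, List.filter_cons]
    split_ifs with ha hb hc
    · exact bestLoop_some nr rest hrest (e.1, e.2)
    · simp only [Bool.and_eq_true] at ha
      exact absurd ha.1 hb
    · simp only [Bool.and_eq_true] at ha
      tauto
    · exact ih hrest
lemma pick_spec (t : List (String × String)) (m : String × String) :
    ∃ pre suf, m :: t = pre ++ (t.foldl pvPick m) :: suf ∧
      (∀ y ∈ pre, PySem.Str.len y.2 < PySem.Str.len (t.foldl pvPick m).2) ∧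
      (∀ y ∈ m :: t, PySem.Str.len y.2 ≤ PySem.Str.len (t.foldl pvPick m).2) := by
  induction t generalizing m with
  | nil => exact ⟨[], [], by simp, by simp, by simp⟩
  | cons x t ih =>
    by_cases h : PySem.Str.len m.2 < PySem.Str.len x.2
    · have hstep : (x :: t).foldl pvPick m = t.foldl pvPick x := by
        simp only [List.foldl_cons, pvPick]; rw [if_pos h]
      rw [hstep]
      obtain ⟨pre, suf, hdec, hpre, hall⟩ := ih x
      refine ⟨m :: pre, suf, ?_, ?_, ?_⟩
      · rw [List.cons_append, ← hdec]
      · intro z hz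
        rcases List.mem_cons.mp hz with rfl | hz'
        · exact lt_of_lt_of_le h (hall x (by simp))
        · exact hpre z hz'
      · intro z hz
        rcases List.mem_cons.mp hz with rfl | hz'
        · exact le_of_lt (lt_of_lt_of_le h (hall x (by simp)))
        · exact hall z hz'
    · have hstep : (x :: t).foldl pvPick m = t.foldl pvPick m := by
        simp only [List.foldl_cons, pvPick]; rw [if_neg h]
      rw [hstep]
      obtain ⟨pre, suf, hdec, hpre, hall⟩ := ih m
      cases pre with
      | nil =>
        simp only [List.nil_append] at hdec
        have hm : m = t.foldl pvPick m := (List.cons.inj hdec).1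
        have hsuf : t = suf := (List.cons.inj hdec).2
        refine ⟨[], x :: suf, ?_, by simp, ?_⟩
        · simp only [List.nil_append]
          rw [← hm, ← hsuf]
        · intro z hz
          rcases List.mem_cons.mp hz with rfl | hz'
          · exact hall z (by simp)
          · rcases List.mem_cons.mp hz' with rfl | hz''
            · exact le_trans (le_of_not_gt h) (hall m (by simp))
            · exact hall z (by simp [hz''])
      | cons p ps =>
        simp only [List.cons_append] at hdec
        have hp : p = m := (List.cons.inj hdec).1.symm
        have ht : t = ps ++ (t.foldl pvPick m) :: suf := (List.cons.inj hdec).2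
        have hmlt : PySem.Str.len m.2 < PySem.Str.len (t.foldl pvPick m).2 := by
          have := hpre p (by simp)
          rwa [hp] at this
        refine ⟨m :: x :: ps, suf, ?_, ?_, ?_⟩
        · rw [List.cons_append, List.cons_append, ← ht]
        · intro z hz
          rcases List.mem_cons.mp hz with rfl | hz'
          · exact hmlt
          · rcases List.mem_cons.mp hz' with rfl | hz''
            · exact lt_of_le_of_lt (le_of_not_gt h) hmlt
            · exact hpre z (by simp [hz''])
        · intro z hz
          rcases List.mem_cons.mp hz with rfl | hz'
          · exact hall z (by simp)
          · rcases List.mem_cons.mp hz' with rfl | hz''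
            · exact le_trans (le_of_not_gt h) (hall m (by simp))
            · exact hall z (by simp [hz''])

lemma head_insertBy_fold (key : String × String → Int) (xs : List (String × String)) :
    ∀ (b : String × String) (rest : List (String × String)),
    (xs.foldl (fun acc x => PySem.List.insertBy (fun a c => decide (key c < key a)) x acc) (b :: rest)).head?
      = some (xs.foldl (fun u x => if key u < key x then x else u) b) := by
  induction xs with
  | nil => intro b rest; simp
  | cons x xs ih =>
    intro b rest
    simp only [List.foldl_cons, PySem.List.insertBy]
    by_cases h : key b < key x
    · rw [if_pos (by simpa using h)]
      rw [ih x (b :: rest)]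
      rw [if_pos h]
    · rw [if_neg (by simpa using h)]
      rw [ih b (PySem.List.insertBy (fun a c => decide (key c < key a)) x rest)]
      rw [if_neg h]

lemma sorted_head (key : String × String → Int) (m : String × String) (t : List (String × String)) :
    (PySem.List.sorted (m :: t) key true).head? = some (t.foldl (fun u x => if key u < key x then x else u) m) := by
  rw [PySem.List.sorted_rev_eq_foldl_insertBy]
  simp only [List.foldl_cons, PySem.List.insertBy]
  exact head_insertBy_fold key t m []

lemma find?_filter_of_imp (L : List (String × String)) (q P : String × String → Bool)
    (h : ∀ p, q p = true → P p = true) : (L.filter P).find? q = L.find? q := by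
  induction L with
  | nil => simp
  | cons x L ih =>
    by_cases hq : q x = true
    · have hP := h x hq
      simp [hP, hq]
    · by_cases hP : P x = true
      · simp [hP, hq, ih]
      · simp [hP, hq, ih]

lemma isIn_len_eq (v nr : String) (h : PySem.Str.isIn v nr = true)
    (hl : PySem.Str.len nr ≤ PySem.Str.len v) : v = nr := by
  have hinf := (PySem.Str.isIn_iff_infix v nr).mp h
  have hle : nr.toList.length ≤ v.toList.length := by
    simp only [PySem.Str.len_eq] at hl; exact_mod_cast hl
  have h2 : v.toList = nr.toList := List.IsInfix.eq_of_length_le hinf hle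
  exact String.toList_inj.mp h2
lemma pvCollect_eq (nr : String) (m : List (String × List String)) :
    pvCollect nr m =
      (m.flatMap (fun e => e.2.map (fun v => (e.1, pvNorm v)))).filter (fun p => PySem.Str.isIn p.2 nr) := by
  have key : ∀ (acc : List (String × String)) (ml : List (String × List String)),
      ml.foldl (fun acc e =>
        e.2.foldl (fun acc v =>
          let nv := pvNorm v
          if PySem.Str.isIn nv nr then acc ++ [(e.1, nv)] else acc) acc) acc
      = acc ++ ((ml.flatMap (fun e => e.2.map (fun v => (e.1, pvNorm v)))).filter
          (fun p => PySem.Str.isIn p.2 nr)) := by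
    intro acc ml
    induction ml generalizing acc with
    | nil => simp
    | cons e rest ih =>
      simp only [List.foldl_cons, List.flatMap_cons, List.filter_append]
      rw [collectInner_eq, ih, List.append_assoc]
  exact key [] m

lemma find?_congr_mem (L : List (String × String)) (q q' : String × String → Bool)
    (h : ∀ p ∈ L, q p = q' p) : L.find? q = L.find? q' := by
  induction L with
  | nil => rfl
  | cons x L ih =>
    have hx := h x (by simp)
    simp only [List.find?_cons, hx]
    cases hq : q' x with
    | true => rfl
    | false => exact ih (fun p hp => h p (by simp [hp]))

-- ===== VERDICT (by name: the statement is the Claim_ definition above) =====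
theorem parse_likert_response_spec : Claim_equal_parse_likert_response := by
  intro raw _hdom hpre
  unfold Spec_parse_likert_response
  have hA_exact : pvExact (pvNorm raw) pvMapping
      = (pvPairs.find? (fun p => p.2 == pvNorm raw)).map Prod.fst := by
    rw [pvExact_eq, pvFlat_eq,
        find?_congr_mem pvPairs (fun p => pvNorm p.2 == pvNorm raw) (fun p => p.2 == pvNorm raw)
          (fun p hp => by
            show (pvNorm p.2 == pvNorm raw) = (p.2 == pvNorm raw)
            rw [pvNorm_pairs p hp])]
  have hcol : pvCollect (pvNorm raw) pvMapping
      = pvPairs.filter (fun p => PySem.Str.isIn p.2 (pvNorm raw)) := by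
    rw [pvCollect_eq, pvFlatNorm_eq]
  have hM : pvPairs.filter (fun p => PySem.Str.isIn p.2 (pvNorm raw)) ≠ [] := by
    obtain ⟨p, hp, hin⟩ := hpre
    intro h0
    rw [List.filter_eq_nil_iff] at h0
    exact (h0 p hp) hin
  obtain ⟨m, t, hMcons⟩ : ∃ m t,
      pvPairs.filter (fun p => PySem.Str.isIn p.2 (pvNorm raw)) = m :: t := by
    cases hMc : pvPairs.filter (fun p => PySem.Str.isIn p.2 (pvNorm raw)) with
    | nil => exact absurd hMc hM
    | cons a l => exact ⟨a, l, rfl⟩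
  obtain ⟨pre, suf, hdec, hprelt, hall⟩ := pick_spec t m
  have hrM : t.foldl pvPick m ∈ pvPairs.filter (fun p => PySem.Str.isIn p.2 (pvNorm raw)) := by
    rw [hMcons, hdec]
    exact List.mem_append.mpr (Or.inr (by simp))
  have hrIn : PySem.Str.isIn (t.foldl pvPick m).2 (pvNorm raw) = true :=
    (List.mem_filter.mp hrM).2
  have hB : parse_likert_response_alt raw = (t.foldl pvPick m).1 := by
    simp only [parse_likert_response_alt]
    rw [bestLoop_none (pvNorm raw) pvPairs pvNorm_pairs, hMcons]
  have hA : parse_likert_response raw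
      = (match (pvPairs.find? (fun p => p.2 == pvNorm raw)).map Prod.fst with
         | some std => std
         | none =>
           match PySem.List.sorted (m :: t) (fun p => PySem.Str.len p.2) true with
           | a :: _ => a.1
           | [] => "") := by
    simp only [parse_likert_response]
    rw [hA_exact, hcol, hMcons]
  rw [hA, hB]
  cases hfind : pvPairs.find? (fun p => p.2 == pvNorm raw) with
  | none =>
    simp only [Option.map_none]
    cases hs : PySem.List.sorted (m :: t) (fun p => PySem.Str.len p.2) true with
    | nil =>
      have := sorted_head (fun p => PySem.Str.len p.2) m t
      rw [hs] at this
      simp at this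
    | cons a l =>
      have := sorted_head (fun p => PySem.Str.len p.2) m t
      rw [hs] at this
      simp only [List.head?_cons, Option.some.injEq] at this
      show a.1 = (t.foldl pvPick m).1
      rw [this]
      rfl
  | some e =>
    simp only [Option.map_some]
    have he2 : e.2 = pvNorm raw := by simpa using List.find?_some hfind
    have heM : e ∈ pvPairs.filter (fun p => PySem.Str.isIn p.2 (pvNorm raw)) := by
      refine List.mem_filter.mpr ⟨List.mem_of_find?_eq_some hfind, ?_⟩
      rw [he2]
      exact (PySem.Str.isIn_iff_infix _ _).mpr (List.infix_rfl)
    have hle1 : PySem.Str.len (pvNorm raw) ≤ PySem.Str.len (t.foldl pvPick m).2 := by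
      have := hall e (by rw [← hMcons]; exact heM)
      rwa [he2] at this
    have hr2 : (t.foldl pvPick m).2 = pvNorm raw := isIn_len_eq _ _ hrIn hle1
    have hpre_none : pre.find? (fun p => p.2 == pvNorm raw) = none := by
      rw [List.find?_eq_none]
      intro y hy hbeq
      have hy2 : y.2 = pvNorm raw := by simpa using hbeq
      have := hprelt y hy
      rw [hy2, hr2] at this
      exact absurd this (lt_irrefl _)
    have hfindM : (pvPairs.filter (fun p => PySem.Str.isIn p.2 (pvNorm raw))).find?
        (fun p => p.2 == pvNorm raw) = some (t.foldl pvPick m) := by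
      rw [hMcons, hdec, List.find?_append, hpre_none]
      simp [hr2]
    have hfindL : pvPairs.find? (fun p => p.2 == pvNorm raw) = some (t.foldl pvPick m) := by
      rw [← find?_filter_of_imp pvPairs (fun p => p.2 == pvNorm raw)
            (fun p => PySem.Str.isIn p.2 (pvNorm raw)) ?_, hfindM]
      intro p hq
      have hp2 : p.2 = pvNorm raw := by simpa using hq
      show PySem.Str.isIn p.2 (pvNorm raw) = true
      rw [hp2]
      exact (PySem.Str.isIn_iff_infix _ _).mpr (List.infix_rfl)
    rw [hfind] at hfindL
    exact congrArg Prod.fst (Option.some.inj hfindL)
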